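-- pv_equiv track=rewrite | github.com/Shrunga-KP/DSA | Sample2 Method.py | generate_student_grades
-- ===== SOURCE A (Python) =====
-- def calculate_grade(mark):
--     if mark >= 90:
--         return 'A+'
--     elif mark >= 80:
--         return 'A'
--     elif mark >= 70:
--         return 'B'
--     elif mark >= 60:
--         return 'C'
--     elif mark >= 50:
--         return 'D'
--     else:
--         return 'F'
--
-- def generate_student_grades(student_marks):
--     student_grades = {}
--     for student, marks in student_marks.items():
--         subject_grades = {}
--         for subject, mark in marks.items():
--             subject_grades[subject] = calculate_grade(mark)
--         student_grades[student] = subject_grades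
--     return student_grades
-- ===== SOURCE B (Python) =====
-- _THRESHOLDS = [50, 60, 70, 80, 90]
-- _GRADES = ['F', 'D', 'C', 'B', 'A', 'A+']
--
-- def _bisect_right(a, x):
--     lo, hi = 0, len(a)
--     while lo < hi:
--         mid = (lo + hi) // 2
--         if x < a[mid]:
--             hi = mid
--         else:
--             lo = mid + 1
--     return lo
--
-- def generate_student_grades(student_marks):
--     return {
--         student: {subject: _GRADES[_bisect_right(_THRESHOLDS, mark)]
--                   for subject, mark in marks.items()}
--         for student, marks in student_marks.items()
--     }
-- ===== Notes on version B (the rewrite author's own statement) =====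
-- stated objective: idiomatic
-- what changed: Replaces the if-elif grade cascade with a sorted threshold table probed by binary search (bisect_right) indexing a grade table, and builds the nested result with dict comprehensions instead of explicit accumulator loops.
import Mathlib
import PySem

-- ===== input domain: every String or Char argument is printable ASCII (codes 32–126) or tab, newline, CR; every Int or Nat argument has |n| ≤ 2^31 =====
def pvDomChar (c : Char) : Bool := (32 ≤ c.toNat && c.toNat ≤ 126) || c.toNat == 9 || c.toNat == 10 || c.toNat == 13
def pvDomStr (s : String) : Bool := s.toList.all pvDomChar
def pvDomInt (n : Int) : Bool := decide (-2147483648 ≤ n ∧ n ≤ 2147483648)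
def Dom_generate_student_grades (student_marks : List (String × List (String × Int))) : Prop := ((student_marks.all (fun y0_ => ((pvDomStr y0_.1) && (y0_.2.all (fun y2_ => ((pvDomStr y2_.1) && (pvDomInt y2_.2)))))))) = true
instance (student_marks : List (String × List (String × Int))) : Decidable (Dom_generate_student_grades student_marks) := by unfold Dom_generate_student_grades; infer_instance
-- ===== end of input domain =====

-- B replaces A's if-elif grade cascade by a threshold table probed with binary search; same cost, more idiomatic.

-- ===== PORT A =====
def calculate_grade (mark : Int) : String :=
  if mark ≥ 90 then "A+"
  else if mark ≥ 80 then "A"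
  else if mark ≥ 70 then "B"
  else if mark ≥ 60 then "C"
  else if mark ≥ 50 then "D"
  else "F"

def generate_student_grades (student_marks : List (String × List (String × Int))) : List (String × List (String × String)) :=
  (student_marks.foldl
    (fun (student_grades : PySem.Dict String (List (String × String))) p =>
      let subject_grades :=
        p.2.foldl (fun (d : PySem.Dict String String) q => d.insert q.1 (calculate_grade q.2)) PySem.Dict.empty
      student_grades.insert p.1 subject_grades.items)
    PySem.Dict.empty).items

-- ===== PORT B =====
def pv_thresholds : List Int := [50, 60, 70, 80, 90]
def pv_grades : List String := ["F", "D", "C", "B", "A", "A+"]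

-- hand-ported binary search (the while loop runs on fuel = a.length, enough since hi - lo shrinks)
def pv_bisect_go (a : List Int) (x : Int) : Nat → Nat → Nat → Nat
  | 0, lo, _ => lo
  | fuel+1, lo, hi =>
    if lo < hi then
      let mid := (lo + hi) / 2
      if x < a.getD mid 0 then pv_bisect_go a x fuel lo mid
      else pv_bisect_go a x fuel (mid+1) hi
    else lo

def pv_bisect_right (a : List Int) (x : Int) : Nat :=
  pv_bisect_go a x a.length 0 a.length

def pv_grade (mark : Int) : String :=
  pv_grades.getD (pv_bisect_right pv_thresholds mark) ""

def generate_student_grades_alt (student_marks : List (String × List (String × Int))) : List (String × List (String × String)) :=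
  (student_marks.foldl
    (fun (student_grades : PySem.Dict String (List (String × String))) p =>
      let subject_grades :=
        p.2.foldl (fun (d : PySem.Dict String String) q => d.insert q.1 (pv_grade q.2)) PySem.Dict.empty
      student_grades.insert p.1 subject_grades.items)
    PySem.Dict.empty).items

-- ===== PRECONDITION & SPEC =====
def Spec_generate_student_grades (student_marks : List (String × List (String × Int))) (out : List (String × List (String × String))) : Prop := out = generate_student_grades_alt student_marks
instance (student_marks : List (String × List (String × Int))) (out : List (String × List (String × String))) : Decidable (Spec_generate_student_grades student_marks out) := by unfold Spec_generate_student_grades; infer_instance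

-- ===== CLAIM (what is proved, stated in full; the proofs are below) =====
def Claim_equal_generate_student_grades : Prop := ∀ (student_marks : List (String × List (String × Int))), Dom_generate_student_grades student_marks → Spec_generate_student_grades student_marks (generate_student_grades student_marks)

-- ===== LEMMAS AND PROOFS =====
theorem grade_eq (m : Int) : calculate_grade m = pv_grade m := by
  unfold calculate_grade pv_grade pv_bisect_right pv_thresholds pv_grades
  rcases Int.lt_or_le m 50 with h | h <;>
    [skip; rcases Int.lt_or_le m 60 with h' | h] <;>
    [skip; skip; rcases Int.lt_or_le m 70 with h' | h] <;>
    [skip; skip; skip; rcases Int.lt_or_le m 80 with h' | h] <;>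
    [skip; skip; skip; skip; rcases Int.lt_or_le m 90 with h' | h]
  · simp [pv_bisect_go, show m < 50 by omega, show ¬ 50 ≤ m by omega, show m < 60 by omega, show ¬ 60 ≤ m by omega, show m < 70 by omega, show ¬ 70 ≤ m by omega, show m < 80 by omega, show ¬ 80 ≤ m by omega, show m < 90 by omega, show ¬ 90 ≤ m by omega]
  · simp [pv_bisect_go, show ¬ m < 50 by omega, show 50 ≤ m by omega, show m < 60 by omega, show ¬ 60 ≤ m by omega, show m < 70 by omega, show ¬ 70 ≤ m by omega, show m < 80 by omega, show ¬ 80 ≤ m by omega, show m < 90 by omega, show ¬ 90 ≤ m by omega]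
  · simp [pv_bisect_go, show ¬ m < 50 by omega, show 50 ≤ m by omega, show ¬ m < 60 by omega, show 60 ≤ m by omega, show m < 70 by omega, show ¬ 70 ≤ m by omega, show m < 80 by omega, show ¬ 80 ≤ m by omega, show m < 90 by omega, show ¬ 90 ≤ m by omega]
  · simp [pv_bisect_go, show ¬ m < 50 by omega, show 50 ≤ m by omega, show ¬ m < 60 by omega, show 60 ≤ m by omega, show ¬ m < 70 by omega, show 70 ≤ m by omega, show m < 80 by omega, show ¬ 80 ≤ m by omega, show m < 90 by omega, show ¬ 90 ≤ m by omega]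
  · simp [pv_bisect_go, show ¬ m < 50 by omega, show 50 ≤ m by omega, show ¬ m < 60 by omega, show 60 ≤ m by omega, show ¬ m < 70 by omega, show 70 ≤ m by omega, show ¬ m < 80 by omega, show 80 ≤ m by omega, show m < 90 by omega, show ¬ 90 ≤ m by omega]
  · simp [pv_bisect_go, show ¬ m < 50 by omega, show 50 ≤ m by omega, show ¬ m < 60 by omega, show 60 ≤ m by omega, show ¬ m < 70 by omega, show 70 ≤ m by omega, show ¬ m < 80 by omega, show 80 ≤ m by omega, show ¬ m < 90 by omega, show 90 ≤ m by omega]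

theorem grade_fun_eq : calculate_grade = pv_grade := funext grade_eq

-- ===== VERDICT (by name: the statement is the Claim_ definition above) =====
theorem generate_student_grades_spec : Claim_equal_generate_student_grades := by
  intro sm _
  unfold Spec_generate_student_grades generate_student_grades generate_student_grades_alt
  rw [grade_fun_eq]
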